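-- pv_equiv track=rewrite | github.com/pypi-data/pypi-mirror-188 | packages/timeseer/timeseer-0.4.2.tar.gz/timeseer-0.4.2/timeseer/modules/analysis/recommendations/recommender_regex_tags_in_group.py | _get_regex_based_on_name
-- ===== SOURCE A (Python) =====
-- def _determine_char_type(char):
--     if char.isnumeric():
--         return "DIGIT"
--     if char.isalpha():
--         return "CHARACTER"
--     if char.isspace():
--         return "WHITESPACE"
--     return "SPECIAL"
--
-- def _get_current_regex_part(current_type, name, last_index_of_type, idx):
--     if current_type == "DIGIT":
--         regex_part = "\\d{" + str(last_index_of_type) + "}"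
--     elif current_type == "CHARACTER":
--         regex_part = "[a-zA-Z]{" + str(last_index_of_type) + "}"
--     elif current_type == "WHITESPACE":
--         regex_part = "\\s{" + str(last_index_of_type) + "}"
--     elif current_type == "SPECIAL":
--         regex_part = "[" + name[idx - 1] + "]"
--     return regex_part
--
-- def _create_generic_regex(name, idx, last_index_of_type, regex_part):
--     if (idx - last_index_of_type) <= 0:
--         return "^" + regex_part
--     if (idx + last_index_of_type) > len(name):
--         return ".*" + regex_part + "$"
--     return ".{" + str(idx - last_index_of_type) + "}" + regex_part
--
-- def _get_current_regex_part_for_last_char(name, char, idx):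
--     if _determine_char_type(char) == "DIGIT":
--         regex_part = "\\d{1}"
--     elif _determine_char_type(char) == "CHARACTER":
--         regex_part = "[a-zA-Z]{1}"
--     elif _determine_char_type(char) == "WHITESPACE":
--         regex_part = "\\s{1}"
--     elif _determine_char_type(char) == "SPECIAL":
--         regex_part = "[" + name[idx] + "]"
--     return regex_part
--
-- def _get_regex_based_on_name(name):
--     last_index_of_type = -1
--     current_type = _determine_char_type(name[0])
--     regex_string = ""
--     generic_regex_for_name = []
--
--     for idx, char in enumerate(name):
--         last_index_of_type += 1
--
--         # Check whether we have to close a logical part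
--         if (
--             _determine_char_type(char) != current_type
--             or _determine_char_type(char) == "SPECIAL"
--             or idx == len(name) - 1
--         ):
--
--             last_char_different = False
--
--             # If last char has same type, extend length of current type
--             if idx == len(name) - 1:
--                 if _determine_char_type(char) == current_type:
--                     last_index_of_type += 1
--                 if _determine_char_type(char) != current_type:
--                     last_char_different = True
--
--             regex_part = _get_current_regex_part(
--                 current_type, name, last_index_of_type, idx
--             )
--
--             regex_string += regex_part
--             if current_type != "SPECIAL":
--                 generic_regex_for_name.append(
--                     _create_generic_regex(name, idx, last_index_of_type, regex_part)
--                 )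
--
--             if last_char_different:
--                 regex_part = _get_current_regex_part_for_last_char(name, char, idx)
--                 regex_string += regex_part
--                 generic_regex_for_name.append(
--                     _create_generic_regex(name, idx, last_index_of_type, regex_part)
--                 )
--
--             current_type = _determine_char_type(char)
--             last_index_of_type = 0
--     return regex_string, generic_regex_for_name
-- ===== SOURCE B (Python) =====
-- def _char_type(char):
--     if char.isnumeric():
--         return "DIGIT"
--     if char.isalpha():
--         return "CHARACTER"
--     if char.isspace():
--         return "WHITESPACE"
--     return "SPECIAL"
--
--
-- def _part(t, name, i, l):
--     if t == "DIGIT":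
--         return "\\d{" + str(l) + "}"
--     if t == "CHARACTER":
--         return "[a-zA-Z]{" + str(l) + "}"
--     if t == "WHITESPACE":
--         return "\\s{" + str(l) + "}"
--     return "[" + name[i - 1] + "]"
--
--
-- def _generic(n, idx, l, part):
--     if idx - l <= 0:
--         return "^" + part
--     if idx + l > n:
--         return ".*" + part + "$"
--     return ".{" + str(idx - l) + "}" + part
--
--
-- def _get_regex_based_on_name(name):
--     n = len(name)
--     types = [_char_type(c) for c in name]
--     # a part is emitted at every boundary: a SPECIAL character, a change of
--     # character type, and the final index
--     fires = [i for i in range(n)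
--              if i == n - 1 or types[i] == "SPECIAL" or (i > 0 and types[i] != types[i - 1])]
--     regex = []
--     generics = []
--     prev = 0
--     for i in fires:
--         t = types[i - 1] if i > 0 else types[0]
--         l = i - prev
--         if i == n - 1 and types[i] == t:
--             l += 1
--         part = _part(t, name, i, l)
--         regex.append(part)
--         if t != "SPECIAL":
--             generics.append(_generic(n, i, l, part))
--         if i == n - 1 and types[i] != t:
--             part = _part(types[i], name, i + 1, 1)
--             regex.append(part)
--             generics.append(_generic(n, i, l, part))
--         prev = i
--     return "".join(regex), generics
-- ===== Notes on version B (the rewrite author's own statement) =====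
-- stated objective: alternative
-- what changed: Replaces A's char-by-char state machine (run-length counter, 'close a logical part' flags and last-char special-casing threaded through one enumerate loop) by a declarative two-phase form: precompute the character-type list and the list of boundary indices (type changes, SPECIAL characters, final index), then emit one regex part per boundary from the gap to the previous boundary.
import Mathlib
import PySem

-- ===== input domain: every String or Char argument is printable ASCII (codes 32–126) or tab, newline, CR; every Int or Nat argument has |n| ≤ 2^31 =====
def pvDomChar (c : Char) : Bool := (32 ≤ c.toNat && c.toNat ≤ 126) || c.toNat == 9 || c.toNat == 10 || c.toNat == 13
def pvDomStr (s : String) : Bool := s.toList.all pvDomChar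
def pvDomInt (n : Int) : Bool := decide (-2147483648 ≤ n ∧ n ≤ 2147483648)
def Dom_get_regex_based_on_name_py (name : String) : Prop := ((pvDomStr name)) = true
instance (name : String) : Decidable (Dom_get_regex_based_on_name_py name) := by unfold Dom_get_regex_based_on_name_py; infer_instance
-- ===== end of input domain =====

-- B re-implements the same regex builder declaratively: precompute the character-type
-- list and the list of boundary indices, then emit one part per boundary — instead of
-- A's char-by-char state machine; return values only (no mutation involved).

-- ===== PORT A =====
-- _determine_char_type (char.isnumeric() = isdigit on the printable-ASCII domain)
def pvA_charType (c : Char) : String :=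
  if PySem.Chars.isdigit c then "DIGIT"
  else if PySem.Chars.isalpha c then "CHARACTER"
  else if PySem.Chars.isspace c then "WHITESPACE"
  else "SPECIAL"

-- _get_current_regex_part; strings built as char lists (String.ofList at the end)
def pvA_currentPart (currentType : String) (cs : List Char) (lastIndexOfType : Int) (idx : Int) : List Char :=
  if currentType = "DIGIT" then "\\d{".toList ++ PySem.Int.toChars lastIndexOfType ++ "}".toList
  else if currentType = "CHARACTER" then "[a-zA-Z]{".toList ++ PySem.Int.toChars lastIndexOfType ++ "}".toList
  else if currentType = "WHITESPACE" then "\\s{".toList ++ PySem.Int.toChars lastIndexOfType ++ "}".toList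
  else "[".toList ++ [(PySem.List.pyGet? cs (idx - 1)).getD ' '] ++ "]".toList
  -- name[idx-1]: in range on every input A returns on (Pre_ excludes the empty name)

-- _create_generic_regex
def pvA_genericRegex (cs : List Char) (idx : Int) (lastIndexOfType : Int) (part : List Char) : List Char :=
  if idx - lastIndexOfType ≤ 0 then "^".toList ++ part
  else if idx + lastIndexOfType > (cs.length : Int) then ".*".toList ++ part ++ "$".toList
  else ".{".toList ++ PySem.Int.toChars (idx - lastIndexOfType) ++ "}".toList ++ part

-- _get_current_regex_part_for_last_char
def pvA_lastCharPart (cs : List Char) (c : Char) (idx : Int) : List Char :=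
  if pvA_charType c = "DIGIT" then "\\d{1}".toList
  else if pvA_charType c = "CHARACTER" then "[a-zA-Z]{1}".toList
  else if pvA_charType c = "WHITESPACE" then "\\s{1}".toList
  else "[".toList ++ [(PySem.List.pyGet? cs idx).getD ' '] ++ "]".toList

structure PvAState where
  last : Int
  cur : String
  rs : List Char
  gen : List (List Char)
  deriving Repr, DecidableEq

-- one iteration of A's `for idx, char in enumerate(name)` loop
def pvA_step (cs : List Char) (s : PvAState) (ic : Int × Char) : PvAState :=
  let idx := ic.1
  let c := ic.2
  let last := s.last + 1
  if pvA_charType c ≠ s.cur ∨ pvA_charType c = "SPECIAL" ∨ idx = (cs.length : Int) - 1 then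
    let lastCharDifferent := idx = (cs.length : Int) - 1 ∧ pvA_charType c ≠ s.cur
    let last := if idx = (cs.length : Int) - 1 ∧ pvA_charType c = s.cur then last + 1 else last
    let part := pvA_currentPart s.cur cs last idx
    let rs := s.rs ++ part
    let gen := if s.cur ≠ "SPECIAL" then s.gen ++ [pvA_genericRegex cs idx last part] else s.gen
    if lastCharDifferent then
      let part2 := pvA_lastCharPart cs c idx
      ⟨0, pvA_charType c, rs ++ part2, gen ++ [pvA_genericRegex cs idx last part2]⟩
    else
      ⟨0, pvA_charType c, rs, gen⟩
  else
    { s with last := last }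

def get_regex_based_on_name_py (name : String) : String × List String :=
  let cs := name.toList
  -- name[0] raises IndexError on the empty name (excluded by Pre_)
  let init : PvAState := ⟨-1, pvA_charType ((PySem.List.pyGet? cs 0).getD ' '), [], []⟩
  let fin := (PySem.List.enumerate cs).foldl (pvA_step cs) init
  (String.ofList fin.rs, fin.gen.map String.ofList)

-- ===== PORT B =====
-- _char_type is the same classifier as A's _determine_char_type, _part the same part
-- builder as A's _get_current_regex_part and _generic the same as _create_generic_regex:
-- B's port shares pvA_charType, pvA_currentPart and pvA_genericRegex.

-- the boundary test of the `fires` comprehension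
def pvFire (types : List String) (n : Nat) (i : Nat) : Bool :=
  i == n - 1 || types.getD i "" == "SPECIAL" ||
    (decide (0 < i) && types.getD i "" != types.getD (i - 1) "")

-- the body of B's `for i in fires` loop; the state is (prev, regex, generics)
def pvB_step (cs : List Char) (types : List String) (n : Nat)
    (st : Nat × List Char × List (List Char)) (i : Nat) : Nat × List Char × List (List Char) :=
  let t := if 0 < i then types.getD (i - 1) "" else types.getD 0 ""
  let l0 := i - st.1
  let l := if i = n - 1 ∧ types.getD i "" = t then l0 + 1 else l0
  let part := pvA_currentPart t cs (l : Int) (i : Int)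
  let rs := st.2.1 ++ part
  let gen := if t ≠ "SPECIAL" then st.2.2 ++ [pvA_genericRegex cs (i : Int) (l : Int) part] else st.2.2
  if i = n - 1 ∧ types.getD i "" ≠ t then
    let part2 := pvA_currentPart (types.getD i "") cs ((1 : Nat) : Int) ((i : Int) + 1)
    (i, rs ++ part2, gen ++ [pvA_genericRegex cs (i : Int) (l : Int) part2])
  else (i, rs, gen)

def get_regex_based_on_name_py_alt (name : String) : String × List String :=
  let cs := name.toList
  let n := cs.length
  let types := cs.map pvA_charType
  let fires := (List.range n).filter (pvFire types n)
  let r := fires.foldl (pvB_step cs types n) (0, [], [])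
  (String.ofList r.2.1, r.2.2.map String.ofList)

-- ===== PRECONDITION & SPEC =====
-- Pre_ excludes only the empty name, on which A raises IndexError at name[0]
-- (B returns ("", []) there).
def Pre_get_regex_based_on_name_py (name : String) : Prop := name.toList ≠ []
instance (name : String) : Decidable (Pre_get_regex_based_on_name_py name) := by unfold Pre_get_regex_based_on_name_py; infer_instance
def pvWitness_get_regex_based_on_name_py : String := "ab12"

def Spec_get_regex_based_on_name_py (name : String) (out : String × List String) : Prop := out = get_regex_based_on_name_py_alt name
instance (name : String) (out : String × List String) : Decidable (Spec_get_regex_based_on_name_py name out) := by unfold Spec_get_regex_based_on_name_py; infer_instance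

-- ===== CLAIM (what is proved, stated in full; the proofs are below) =====
def Claim_equal_get_regex_based_on_name_py : Prop := ∀ (name : String), Dom_get_regex_based_on_name_py name → Pre_get_regex_based_on_name_py name → Spec_get_regex_based_on_name_py name (get_regex_based_on_name_py name)

-- ===== LEMMAS AND PROOFS =====

-- length of the maximal same-type run at the head of a suffix (proof-only)
def pvRunLen : List Char → String → Nat
  | [], _ => 0
  | c :: rest, t => if pvA_charType c = t then 1 + pvRunLen rest t else 0

theorem runLen_le (xs : List Char) (t : String) : pvRunLen xs t ≤ xs.length := by
  induction xs with
  | nil => simp [pvRunLen]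
  | cons c xs ih =>
    unfold pvRunLen
    split_ifs <;> simp <;> omega

theorem runLen_take (xs : List Char) (t : String) :
    ∀ c ∈ xs.take (pvRunLen xs t), pvA_charType c = t := by
  induction xs with
  | nil => simp [pvRunLen]
  | cons c xs ih =>
    unfold pvRunLen
    split_ifs with h
    · intro d hd
      rw [show 1 + pvRunLen xs t = pvRunLen xs t + 1 by omega] at hd
      simp only [List.take_succ_cons, List.mem_cons] at hd
      rcases hd with rfl | hd
      · exact h
      · exact ih d hd
    · simp

theorem runLen_all (xs : List Char) (t : String) (h : pvRunLen xs t = xs.length) :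
    ∀ c ∈ xs, pvA_charType c = t := by
  have h2 := runLen_take xs t
  rw [h, List.take_length] at h2
  exact h2

theorem runLen_next (xs : List Char) (t : String) :
    pvRunLen xs t < xs.length → pvA_charType (xs.getD (pvRunLen xs t) ' ') ≠ t := by
  induction xs with
  | nil => intro h; simp [pvRunLen] at h
  | cons c xs ih =>
    intro h
    have hr : pvRunLen (c :: xs) t = if pvA_charType c = t then 1 + pvRunLen xs t else 0 := rfl
    rw [hr] at h ⊢
    split_ifs with hc
    · rw [show 1 + pvRunLen xs t = pvRunLen xs t + 1 by omega] at h ⊢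
      rw [if_pos hc] at h
      simp only [List.getD_cons_succ]
      exact ih (by simp only [List.length_cons] at h; omega)
    · simpa using hc

theorem runLen_idx (xs : List Char) (t : String) :
    ∀ x, x < pvRunLen xs t → pvA_charType (xs.getD x ' ') = t := by
  induction xs with
  | nil => intro x hx; simp [pvRunLen] at hx
  | cons c xs ih =>
    intro x hx
    have hr : pvRunLen (c :: xs) t = if pvA_charType c = t then 1 + pvRunLen xs t else 0 := rfl
    rw [hr] at hx
    split_ifs at hx with hc
    · cases x with
      | zero => simpa using hc
      | succ x =>
        simp only [List.getD_cons_succ]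
        exact ih x (by omega)
    · omega

-- the reference emitter: one step per run, exactly A's emissions (proof-only)
def pvE (cs : List Char) : Nat → List Char → Nat → String → List Char × List (List Char)
  | 0, _, _, _ => ([], [])
  | _ + 1, [], _, _ => ([], [])
  | fuel + 1, c0 :: rest0, q, t =>
    let n := cs.length
    let suffix := c0 :: rest0
    let k := if t = "SPECIAL" then 0 else pvRunLen suffix t
    if q + k = n then
      let part := pvA_currentPart t cs ((k + 1 : Nat) : Int) ((n : Int) - 1)
      (part, if t ≠ "SPECIAL" then [pvA_genericRegex cs ((n : Int) - 1) ((k + 1 : Nat) : Int) part] else [])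
    else if q + k = n - 1 then
      let c2 := suffix.getD k ' '
      let t2 := pvA_charType c2
      if t2 = t then
        let part := pvA_currentPart t cs ((k + 2 : Nat) : Int) ((n : Int) - 1)
        (part, if t ≠ "SPECIAL" then [pvA_genericRegex cs ((n : Int) - 1) ((k + 2 : Nat) : Int) part] else [])
      else
        let part := pvA_currentPart t cs ((k + 1 : Nat) : Int) ((n : Int) - 1)
        let part2 := pvA_lastCharPart cs c2 ((n : Int) - 1)
        (part ++ part2,
          (if t ≠ "SPECIAL" then [pvA_genericRegex cs ((n : Int) - 1) ((k + 1 : Nat) : Int) part] else [])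
            ++ [pvA_genericRegex cs ((n : Int) - 1) ((k + 1 : Nat) : Int) part2])
    else
      let c2 := suffix.getD k ' '
      let t2 := pvA_charType c2
      let part := pvA_currentPart t cs ((k + 1 : Nat) : Int) ((q + k : Nat) : Int)
      let res := pvE cs fuel (suffix.drop (k + 1)) (q + k + 1) t2
      (part ++ res.1,
        (if t ≠ "SPECIAL" then [pvA_genericRegex cs ((q + k : Nat) : Int) ((k + 1 : Nat) : Int) part] else [])
          ++ res.2)

-- evaluations of one iteration of A's loop, by the kind of step taken
theorem pvA_step_quiet (cs : List Char) (s : PvAState) (idx : Int) (c : Char)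
    (hc : pvA_charType c = s.cur) (hns : s.cur ≠ "SPECIAL") (hni : idx ≠ (cs.length : Int) - 1) :
    pvA_step cs s (idx, c) = { s with last := s.last + 1 } := by
  unfold pvA_step
  dsimp only
  rw [if_neg]
  push_neg
  exact ⟨by simp [hc], by rw [hc]; exact hns, hni⟩

theorem pvA_step_boundary (cs : List Char) (s : PvAState) (idx : Int) (c : Char)
    (hfire : pvA_charType c ≠ s.cur ∨ pvA_charType c = "SPECIAL" ∨ idx = (cs.length : Int) - 1)
    (hni : idx ≠ (cs.length : Int) - 1) :
    pvA_step cs s (idx, c) =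
      ⟨0, pvA_charType c, s.rs ++ pvA_currentPart s.cur cs (s.last + 1) idx,
        if s.cur ≠ "SPECIAL" then
          s.gen ++ [pvA_genericRegex cs idx (s.last + 1) (pvA_currentPart s.cur cs (s.last + 1) idx)]
        else s.gen⟩ := by
  unfold pvA_step
  dsimp only
  rw [if_pos hfire, if_neg (by simp [hni]), if_neg (by simp [hni])]

theorem pvA_step_last_same (cs : List Char) (s : PvAState) (idx : Int) (c : Char)
    (hidx : idx = (cs.length : Int) - 1) (hsame : pvA_charType c = s.cur) :
    pvA_step cs s (idx, c) =
      ⟨0, pvA_charType c, s.rs ++ pvA_currentPart s.cur cs (s.last + 1 + 1) idx,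
        if s.cur ≠ "SPECIAL" then
          s.gen ++ [pvA_genericRegex cs idx (s.last + 1 + 1) (pvA_currentPart s.cur cs (s.last + 1 + 1) idx)]
        else s.gen⟩ := by
  unfold pvA_step
  dsimp only
  rw [if_pos (Or.inr (Or.inr hidx)), if_neg (by simp [hsame]), if_pos ⟨hidx, hsame⟩]

theorem pvA_step_last_diff (cs : List Char) (s : PvAState) (idx : Int) (c : Char)
    (hidx : idx = (cs.length : Int) - 1) (hdiff : pvA_charType c ≠ s.cur) :
    pvA_step cs s (idx, c) =
      ⟨0, pvA_charType c,
        s.rs ++ pvA_currentPart s.cur cs (s.last + 1) idx ++ pvA_lastCharPart cs c idx,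
        (if s.cur ≠ "SPECIAL" then
          s.gen ++ [pvA_genericRegex cs idx (s.last + 1) (pvA_currentPart s.cur cs (s.last + 1) idx)]
        else s.gen)
          ++ [pvA_genericRegex cs idx (s.last + 1) (pvA_lastCharPart cs c idx)]⟩ := by
  unfold pvA_step
  dsimp only
  rw [if_pos (Or.inl hdiff), if_pos ⟨hidx, hdiff⟩, if_neg (by simp [hdiff])]

-- A's loop does nothing but count over a same-type run that stays strictly before the last index
theorem pvA_quiet (cs : List Char) (t : String) (ht : t ≠ "SPECIAL") :
    ∀ (T : List Char) (q : Nat) (a : Int) (rs : List Char) (gen : List (List Char)),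
    (∀ c ∈ T, pvA_charType c = t) → q + T.length < cs.length →
    List.foldl (pvA_step cs) ⟨a, t, rs, gen⟩ (PySem.List.enumerate T (q : Int)) =
      ⟨a + T.length, t, rs, gen⟩ := by
  intro T
  induction T with
  | nil => intro q a rs gen _ _; simp [PySem.List.enumerate_nil]
  | cons c T ih =>
    intro q a rs gen hT hlt
    rw [PySem.List.enumerate_cons, List.foldl_cons]
    have hc : pvA_charType c = t := hT c (by simp)
    rw [pvA_step_quiet cs _ _ _ hc ht (by simp at hlt ⊢; omega)]
    rw [show ((q : Int) + 1) = ((q + 1 : Nat) : Int) by push_cast; ring]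
    rw [ih (q + 1) (a + 1) rs gen (fun d hd => hT d (by simp [hd])) (by simp at hlt ⊢; omega)]
    congr 1
    simp
    ring

-- reduce A's fold to the state just after the next boundary step (quiet run, then one step)
theorem pvA_boundary (cs : List Char) (t : String) (suffix : List Char) (q m : Nat)
    (rs : List Char) (gen : List (List Char))
    (hT : ∀ c ∈ suffix.take m, pvA_charType c = t) (ht' : m ≠ 0 → t ≠ "SPECIAL")
    (hlt : q + m < cs.length) (hm : m < suffix.length) :
    List.foldl (pvA_step cs) ⟨0, t, rs, gen⟩ (PySem.List.enumerate suffix (q : Int)) =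
      List.foldl (pvA_step cs)
        (pvA_step cs ⟨(m : Int), t, rs, gen⟩ (((q + m : Nat) : Int), suffix.getD m ' '))
        (PySem.List.enumerate (suffix.drop (m + 1)) ((q + m + 1 : Nat) : Int)) := by
  conv_lhs => rw [← List.take_append_drop m suffix, List.drop_eq_getElem_cons hm]
  rw [PySem.List.enumerate_append, List.foldl_append, PySem.List.enumerate_cons, List.foldl_cons]
  have htl : (suffix.take m).length = m := by simp; omega
  have hquiet : List.foldl (pvA_step cs) ⟨0, t, rs, gen⟩
      (PySem.List.enumerate (suffix.take m) (q : Int)) = ⟨(m : Int), t, rs, gen⟩ := by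
    rcases Nat.eq_zero_or_pos m with rfl | hpos
    · simp [PySem.List.enumerate_nil]
    · rw [pvA_quiet cs t (ht' (by omega)) (suffix.take m) q 0 rs gen hT (by omega), htl]
      norm_num
  rw [hquiet, htl, List.getD_eq_getElem suffix ' ' (by omega)]
  congr 2 <;> push_cast <;> ring

theorem pvA_main (cs : List Char) : ∀ (fuel : Nat) (suffix : List Char) (q : Nat) (t : String)
    (rs : List Char) (gen : List (List Char)),
    suffix = cs.drop q → 1 ≤ q → q < cs.length → suffix.length ≤ fuel →
    ∃ a u,
      List.foldl (pvA_step cs) ⟨0, t, rs, gen⟩ (PySem.List.enumerate suffix (q : Int)) =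
        ⟨a, u, rs ++ (pvE cs fuel suffix q t).1, gen ++ (pvE cs fuel suffix q t).2⟩ := by
  intro fuel
  induction fuel with
  | zero =>
    intro suffix q t rs gen hsuf hq1 hq2 hfuel
    exfalso
    rw [hsuf] at hfuel
    simp [List.length_drop] at hfuel
    omega
  | succ fuel ih =>
    intro suffix q t rs gen hsuf hq1 hq2 hfuel
    have hlen : suffix.length = cs.length - q := by rw [hsuf]; simp
    obtain ⟨c0, rest0, rfl⟩ : ∃ c0 rest0, suffix = c0 :: rest0 := by
      cases suffix with
      | nil => exfalso; simp at hlen; omega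
      | cons a b => exact ⟨a, b, rfl⟩
    have hk_le : (if t = "SPECIAL" then 0 else pvRunLen (c0 :: rest0) t) ≤ (c0 :: rest0).length := by
      split_ifs
      · omega
      · exact runLen_le _ _
    generalize hkdef : (if t = "SPECIAL" then 0 else pvRunLen (c0 :: rest0) t) = k at hk_le
    have hTtake : ∀ c ∈ (c0 :: rest0).take k, pvA_charType c = t := by
      rw [← hkdef]
      split_ifs
      · simp
      · exact runLen_take _ _
    have ht' : k ≠ 0 → t ≠ "SPECIAL" := by
      intro h hsp
      rw [← hkdef, if_pos hsp] at h
      exact h rfl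
    have hnext : t ≠ "SPECIAL" → k < (c0 :: rest0).length →
        pvA_charType ((c0 :: rest0).getD k ' ') ≠ t := by
      intro hts hklt
      rw [← hkdef, if_neg hts] at hklt ⊢
      exact runLen_next _ _ hklt
    simp only [pvE]
    rw [hkdef]
    by_cases hc1 : q + k = cs.length
    · -- case 1: the current run reaches the end of the name
      rw [if_pos hc1]
      have hkl : k = (c0 :: rest0).length := by simp at hlen ⊢; omega
      have hkpos : k ≠ 0 := by simp at hkl; omega
      have htne : t ≠ "SPECIAL" := ht' hkpos
      have hall : ∀ c ∈ (c0 :: rest0), pvA_charType c = t := by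
        apply runLen_all
        rw [← hkdef, if_neg htne] at hkl
        omega
      rw [pvA_boundary cs t _ q (k - 1) rs gen
            (fun c hc => hall c (List.mem_of_mem_take hc)) (fun _ => htne) (by omega) (by omega)]
      rw [show k - 1 + 1 = k by omega, List.drop_eq_nil_of_le (by omega),
        PySem.List.enumerate_nil, List.foldl_nil]
      have hcb : pvA_charType ((c0 :: rest0).getD (k - 1) ' ') = t := by
        apply hall
        rw [List.getD_eq_getElem _ ' ' (by omega)]
        exact List.getElem_mem _
      rw [pvA_step_last_same cs _ _ _ (by push_cast; omega) hcb]
      refine ⟨0, pvA_charType ((c0 :: rest0).getD (k - 1) ' '), ?_⟩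
      have e1 : ((k - 1 : Nat) : Int) + 1 + 1 = ((k + 1 : Nat) : Int) := by omega
      have e2 : ((q + (k - 1) : Nat) : Int) = (cs.length : Int) - 1 := by omega
      simp only [e1, e2, if_pos htne]
    · rw [if_neg hc1]
      have hklt : k < (c0 :: rest0).length := by
        simp only [List.length_cons] at hlen hk_le ⊢
        omega
      by_cases hc2 : q + k = cs.length - 1
      · rw [if_pos hc2]
        rw [pvA_boundary cs t _ q k rs gen hTtake ht' (by omega) hklt]
        rw [List.drop_eq_nil_of_le (by simp only [List.length_cons] at hlen ⊢; omega),
          PySem.List.enumerate_nil, List.foldl_nil]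
        by_cases ht2 : pvA_charType ((c0 :: rest0).getD k ' ') = t
        · rw [if_pos ht2]
          rw [pvA_step_last_same cs _ _ _ (by push_cast; omega) ht2]
          refine ⟨0, pvA_charType ((c0 :: rest0).getD k ' '), ?_⟩
          have e1 : (k : Int) + 1 + 1 = ((k + 2 : Nat) : Int) := by omega
          have e2 : ((q + k : Nat) : Int) = (cs.length : Int) - 1 := by omega
          simp only [e1, e2]
          by_cases hsp : t = "SPECIAL" <;> simp [hsp]
        · rw [if_neg ht2]
          rw [pvA_step_last_diff cs _ _ _ (by push_cast; omega) ht2]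
          refine ⟨0, pvA_charType ((c0 :: rest0).getD k ' '), ?_⟩
          have e1 : (k : Int) + 1 = ((k + 1 : Nat) : Int) := by omega
          have e2 : ((q + k : Nat) : Int) = (cs.length : Int) - 1 := by omega
          simp only [e1, e2]
          by_cases hsp : t = "SPECIAL" <;> simp [hsp]
      · rw [if_neg hc2]
        rw [pvA_boundary cs t _ q k rs gen hTtake ht' (by omega) hklt]
        have hfire : pvA_charType ((c0 :: rest0).getD k ' ') ≠ t ∨
            pvA_charType ((c0 :: rest0).getD k ' ') = "SPECIAL" ∨
            ((q + k : Nat) : Int) = (cs.length : Int) - 1 := by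
          by_cases hsp : t = "SPECIAL"
          · by_cases ht2 : pvA_charType ((c0 :: rest0).getD k ' ') = t
            · exact Or.inr (Or.inl (by rw [ht2, hsp]))
            · exact Or.inl ht2
          · exact Or.inl (hnext hsp hklt)
        rw [pvA_step_boundary cs _ _ _ (by simpa using hfire) (by push_cast; omega)]
        have hsuf' : (c0 :: rest0).drop (k + 1) = cs.drop (q + (k + 1)) := by
          rw [hsuf, List.drop_drop]
          try congr 1
          try omega
        obtain ⟨a, u, hfold⟩ := ih ((c0 :: rest0).drop (k + 1)) (q + k + 1)
          (pvA_charType ((c0 :: rest0).getD k ' '))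
          (rs ++ pvA_currentPart t cs ((k : Int) + 1) ((q + k : Nat) : Int))
          (if t ≠ "SPECIAL" then
            gen ++ [pvA_genericRegex cs ((q + k : Nat) : Int) ((k : Int) + 1)
              (pvA_currentPart t cs ((k : Int) + 1) ((q + k : Nat) : Int))]
          else gen)
          (by rw [hsuf']; rfl) (by omega)
          (by simp only [List.length_cons] at hlen hk_le ⊢; omega)
          (by simp only [List.length_drop, List.length_cons] at hlen hfuel ⊢; omega)
        simp only []
        rw [hfold]
        refine ⟨a, u, ?_⟩
        have e1 : (k : Int) + 1 = ((k + 1 : Nat) : Int) := by omega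
        simp only [e1]
        by_cases hsp : t = "SPECIAL" <;> simp [hsp]

-- positions: getD through drop, and through the type list
theorem getD_drop (cs : List Char) (q k : Nat) (d : Char) :
    (cs.drop q).getD k d = cs.getD (q + k) d := by
  simp [List.getD, List.getElem?_drop]

theorem typesD (cs : List Char) (j : Nat) (h : j < cs.length) :
    (cs.map pvA_charType).getD j "" = pvA_charType (cs.getD j ' ') := by
  rw [List.getD_eq_getElem _ "" (by simpa using h), List.getD_eq_getElem _ ' ' h,
    List.getElem_map]

-- B's uniform _part call at the final boundary computes A's last-char part
theorem lastPart_bridge (cs : List Char) (c : Char) (idx : Int) :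
    pvA_currentPart (pvA_charType c) cs ((1 : Nat) : Int) (idx + 1) =
      pvA_lastCharPart cs c idx := by
  have h1 : PySem.Int.toChars ((1 : Nat) : Int) = ['1'] := by decide
  unfold pvA_currentPart pvA_lastCharPart
  split_ifs
  · rw [h1]; rfl
  · rw [h1]; rfl
  · rw [h1]; rfl
  · rw [show idx + 1 - 1 = idx by ring]

-- a fire-free prefix of the index range contributes nothing to the filter
theorem fires_split (types : List String) (n q j m : Nat) (hjm : j ≤ m)
    (hno : ∀ x, x < j → pvFire types n (q + x) = false) :
    (List.range' q m).filter (pvFire types n) =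
      (List.range' (q + j) (m - j)).filter (pvFire types n) := by
  rw [show m = j + (m - j) by omega, ← List.range'_append_1, List.filter_append,
    show j + (m - j) - j = m - j by omega]
  have hnil : (List.range' q j).filter (pvFire types n) = [] := by
    rw [List.filter_eq_nil_iff]
    intro a ha
    rw [List.mem_range'_1] at ha
    have := hno (a - q) (by omega)
    rw [show q + (a - q) = a by omega] at this
    simp [this]
  rw [hnil, List.nil_append]

-- evaluations of one step of B's boundary loop, by the kind of boundary
theorem pvB_step_mid (cs : List Char) (types : List String) (n : Nat)
    (st : Nat × List Char × List (List Char)) (i : Nat) (hi : 0 < i) (hni : ¬ i = n - 1) :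
    pvB_step cs types n st i =
      (i, st.2.1 ++ pvA_currentPart (types.getD (i - 1) "") cs ((i - st.1 : Nat) : Int) (i : Int),
        if types.getD (i - 1) "" ≠ "SPECIAL" then
          st.2.2 ++ [pvA_genericRegex cs (i : Int) ((i - st.1 : Nat) : Int)
            (pvA_currentPart (types.getD (i - 1) "") cs ((i - st.1 : Nat) : Int) (i : Int))]
        else st.2.2) := by
  simp only [pvB_step, if_pos hi,
    if_neg (show ¬(i = n - 1 ∧ types.getD i "" = types.getD (i - 1) "") from fun h => hni h.1),
    if_neg (show ¬(i = n - 1 ∧ types.getD i "" ≠ types.getD (i - 1) "") from fun h => hni h.1)]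

theorem pvB_step_zero (cs : List Char) (types : List String) (n : Nat)
    (st : Nat × List Char × List (List Char)) (hni : ¬ (0 : Nat) = n - 1) :
    pvB_step cs types n st 0 =
      (0, st.2.1 ++ pvA_currentPart (types.getD 0 "") cs ((0 - st.1 : Nat) : Int) ((0 : Nat) : Int),
        if types.getD 0 "" ≠ "SPECIAL" then
          st.2.2 ++ [pvA_genericRegex cs ((0 : Nat) : Int) ((0 - st.1 : Nat) : Int)
            (pvA_currentPart (types.getD 0 "") cs ((0 - st.1 : Nat) : Int) ((0 : Nat) : Int))]
        else st.2.2) := by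
  simp only [pvB_step, if_neg (show ¬ (0 : Nat) < 0 by omega),
    if_neg (show ¬((0 : Nat) = n - 1 ∧ types.getD 0 "" ≠ types.getD (0 - 1) "") from fun h => hni h.1)]
  simp only [if_neg (show ¬((0 : Nat) = n - 1 ∧ True) from fun h => hni h.1)]

theorem pvB_step_last_same (cs : List Char) (types : List String) (n : Nat)
    (st : Nat × List Char × List (List Char)) (i : Nat) (hi : 0 < i) (hni : i = n - 1)
    (hsame : types.getD i "" = types.getD (i - 1) "") :
    pvB_step cs types n st i =
      (i, st.2.1 ++ pvA_currentPart (types.getD (i - 1) "") cs ((i - st.1 + 1 : Nat) : Int) (i : Int),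
        if types.getD (i - 1) "" ≠ "SPECIAL" then
          st.2.2 ++ [pvA_genericRegex cs (i : Int) ((i - st.1 + 1 : Nat) : Int)
            (pvA_currentPart (types.getD (i - 1) "") cs ((i - st.1 + 1 : Nat) : Int) (i : Int))]
        else st.2.2) := by
  simp only [pvB_step, if_pos hi,
    if_pos (show i = n - 1 ∧ types.getD i "" = types.getD (i - 1) "" from ⟨hni, hsame⟩),
    if_neg (show ¬(i = n - 1 ∧ types.getD i "" ≠ types.getD (i - 1) "") from fun h => h.2 hsame)]

theorem pvB_step_last_diff (cs : List Char) (types : List String) (n : Nat)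
    (st : Nat × List Char × List (List Char)) (i : Nat) (hi : 0 < i) (hni : i = n - 1)
    (hdiff : types.getD i "" ≠ types.getD (i - 1) "") :
    pvB_step cs types n st i =
      (i, st.2.1 ++ pvA_currentPart (types.getD (i - 1) "") cs ((i - st.1 : Nat) : Int) (i : Int)
          ++ pvA_currentPart (types.getD i "") cs ((1 : Nat) : Int) ((i : Int) + 1),
        (if types.getD (i - 1) "" ≠ "SPECIAL" then
          st.2.2 ++ [pvA_genericRegex cs (i : Int) ((i - st.1 : Nat) : Int)
            (pvA_currentPart (types.getD (i - 1) "") cs ((i - st.1 : Nat) : Int) (i : Int))]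
        else st.2.2)
          ++ [pvA_genericRegex cs (i : Int) ((i - st.1 : Nat) : Int)
            (pvA_currentPart (types.getD i "") cs ((1 : Nat) : Int) ((i : Int) + 1))]) := by
  simp only [pvB_step, if_pos hi,
    if_neg (show ¬(i = n - 1 ∧ types.getD i "" = types.getD (i - 1) "") from fun h => hdiff h.2),
    if_pos (show i = n - 1 ∧ types.getD i "" ≠ types.getD (i - 1) "" from ⟨hni, hdiff⟩)]

-- B's boundary fold computes pvE: from position q on, with the previous boundary at q - 1
theorem pvB_main (cs : List Char) : ∀ (fuel q : Nat) (t : String) (rs : List Char)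
    (gen : List (List Char)),
    1 ≤ q → q < cs.length → cs.length - q ≤ fuel →
    t = pvA_charType (cs.getD (q - 1) ' ') →
    ((List.range' q (cs.length - q)).filter (pvFire (cs.map pvA_charType) cs.length)).foldl
        (pvB_step cs (cs.map pvA_charType) cs.length) (q - 1, rs, gen) =
      (cs.length - 1, rs ++ (pvE cs fuel (cs.drop q) q t).1,
        gen ++ (pvE cs fuel (cs.drop q) q t).2) := by
  intro fuel
  induction fuel with
  | zero =>
    intro q t rs gen hq1 hq2 hf ht
    omega
  | succ fuel ih =>
    intro q t rs gen hq1 hq2 hf ht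
    obtain ⟨c0, rest0, hsuf⟩ : ∃ c0 rest0, cs.drop q = c0 :: rest0 := by
      cases hd : cs.drop q with
      | nil =>
        exfalso
        have h2 := congrArg List.length hd
        simp only [List.length_drop, List.length_nil] at h2
        omega
      | cons a b => exact ⟨a, b, rfl⟩
    have hlen0 : (c0 :: rest0).length = cs.length - q := by rw [← hsuf]; simp
    have hk_le : (if t = "SPECIAL" then 0 else pvRunLen (c0 :: rest0) t) ≤ (c0 :: rest0).length := by
      split_ifs
      · omega
      · exact runLen_le _ _
    generalize hkdef : (if t = "SPECIAL" then 0 else pvRunLen (c0 :: rest0) t) = k at hk_le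
    have ht' : k ≠ 0 → t ≠ "SPECIAL" := by
      intro h hsp
      rw [← hkdef, if_pos hsp] at h
      exact h rfl
    have hgq : ∀ x, (c0 :: rest0).getD x ' ' = cs.getD (q + x) ' ' := by
      intro x
      rw [← hsuf, getD_drop]
    have htm1 : (cs.map pvA_charType).getD (q - 1) "" = t := by
      rw [typesD _ _ (by omega), ← ht]
    have htrun : ∀ x, x < k → (cs.map pvA_charType).getD (q + x) "" = t := by
      intro x hx
      have htne := ht' (by omega)
      rw [typesD _ _ (by omega), ← hgq]
      apply runLen_idx
      rw [show pvRunLen (c0 :: rest0) t = k by rw [← hkdef, if_neg htne]]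
      exact hx
    have htprev : ∀ x, x ≤ k → (cs.map pvA_charType).getD (q + x - 1) "" = t := by
      intro x hx
      cases x with
      | zero => simpa using htm1
      | succ x =>
        rw [show q + (x + 1) - 1 = q + x by omega]
        exact htrun x (by omega)
    have hj : min k (cs.length - 1 - q) ≤ k := min_le_left _ _
    generalize hjdef : min k (cs.length - 1 - q) = j at hj
    have hjn : q + j ≤ cs.length - 1 := by omega
    have hno : ∀ x, x < j → pvFire (cs.map pvA_charType) cs.length (q + x) = false := by
      intro x hx
      have hxk : x < k := by omega
      have htne := ht' (by omega)
      have h2 := htrun x hxk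
      have h3 := htprev x (by omega)
      rw [show q + x - 1 = q + x - 1 from rfl] at h3
      unfold pvFire
      rw [h2, h3]
      simp [htne, show ¬(q + x = cs.length - 1) by omega]
    rw [fires_split (cs.map pvA_charType) cs.length q j (cs.length - q) (by omega) hno]
    rw [show cs.length - q - j = (cs.length - q - j - 1) + 1 by omega, List.range'_succ]
    have hfj : pvFire (cs.map pvA_charType) cs.length (q + j) = true := by
      by_cases hlast : q + j = cs.length - 1
      · unfold pvFire
        simp [hlast]
      · have hjk : j = k := by omega
        have h3 := htprev k (by omega)
        by_cases htsp : t = "SPECIAL"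
        · -- an empty SPECIAL run: the char at the boundary is SPECIAL or differs from it
          have hk0 : k = 0 := by rw [← hkdef, if_pos htsp]
          unfold pvFire
          rw [hjk]
          by_cases hq2' : (cs.map pvA_charType).getD (q + k) "" = "SPECIAL"
          · simp only [Bool.or_eq_true, beq_iff_eq, Bool.and_eq_true, bne_iff_ne,
              decide_eq_true_eq]
            left
            right
            exact hq2'
          · simp only [Bool.or_eq_true, beq_iff_eq, Bool.and_eq_true, bne_iff_ne,
              decide_eq_true_eq]
            right
            refine ⟨by omega, ?_⟩
            rw [h3, htsp]
            exact hq2'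
        · have hklt : k < (c0 :: rest0).length := by omega
          have hnx : pvA_charType ((c0 :: rest0).getD k ' ') ≠ t := by
            have := runLen_next (c0 :: rest0) t
            rw [show pvRunLen (c0 :: rest0) t = k by rw [← hkdef, if_neg htsp]] at this
            exact this hklt
          have h2 : (cs.map pvA_charType).getD (q + k) "" ≠ t := by
            rw [typesD _ _ (by omega), ← hgq]
            exact hnx
          unfold pvFire
          rw [hjk]
          simp only [Bool.or_eq_true, beq_iff_eq, Bool.and_eq_true, bne_iff_ne,
            decide_eq_true_eq]
          right
          refine ⟨by omega, ?_⟩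
          rw [h3]
          exact h2
    rw [List.filter_cons_of_pos hfj, List.foldl_cons]
    have hiq : 0 < q + j := by omega
    have htim1 : (cs.map pvA_charType).getD (q + j - 1) "" = t := htprev j (by omega)
    rw [hsuf]
    simp only [pvE]
    rw [hkdef]
    by_cases hlast : q + j = cs.length - 1
    · -- the boundary at the last index closes everything
      have hnil : (cs.length - q - j - 1) = 0 := by omega
      rw [hnil, List.range'_zero, List.filter_nil, List.foldl_nil]
      have hkrange : k = cs.length - 1 - q ∨ k = cs.length - q := by omega
      by_cases hsame : (cs.map pvA_charType).getD (q + j) "" = (cs.map pvA_charType).getD (q + j - 1) ""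
      · rw [pvB_step_last_same cs _ _ _ _ hiq hlast hsame]
        have hl : q + j - (q - 1, rs, gen).1 + 1 = cs.length - q + 1 := by
          simp only []
          omega
        by_cases hc1 : q + k = cs.length
        · rw [if_pos hc1]
          rw [htim1, hl]
          simp only [show ((q - 1 : Nat), rs, gen).2.1 = rs from rfl,
            show ((q - 1 : Nat), rs, gen).2.2 = gen from rfl]
          rw [show cs.length - q + 1 = k + 1 by omega,
            show ((q + j : Nat) : Int) = (cs.length : Int) - 1 by omega]
          by_cases hsp : t = "SPECIAL" <;> simp [hsp, hlast]
        · have hc2 : q + k = cs.length - 1 := by omega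
          rw [if_neg hc1, if_pos hc2]
          have ht2 : pvA_charType ((c0 :: rest0).getD k ' ') = t := by
            have : (cs.map pvA_charType).getD (q + k) "" = t := by
              rw [show q + k = q + j by omega, hsame, htim1]
            rw [typesD _ _ (by omega), ← hgq] at this
            exact this
          rw [if_pos ht2]
          rw [htim1, hl]
          simp only [show ((q - 1 : Nat), rs, gen).2.1 = rs from rfl,
            show ((q - 1 : Nat), rs, gen).2.2 = gen from rfl]
          rw [show cs.length - q + 1 = k + 2 by omega,
            show ((q + j : Nat) : Int) = (cs.length : Int) - 1 by omega]
          by_cases hsp : t = "SPECIAL" <;> simp [hsp, hlast]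
      · rw [pvB_step_last_diff cs _ _ _ _ hiq hlast hsame]
        have hc1 : ¬ q + k = cs.length := by
          intro hc1
          apply hsame
          have hall : ∀ c ∈ (c0 :: rest0), pvA_charType c = t := by
            apply runLen_all
            have htne : t ≠ "SPECIAL" := ht' (by omega)
            have hrk : pvRunLen (c0 :: rest0) t = k := by rw [← hkdef, if_neg htne]
            omega
          have : (cs.map pvA_charType).getD (q + j) "" = t := by
            rw [typesD _ _ (by omega), show q + j = q + (k - 1) by omega, ← hgq]
            apply hall
            rw [List.getD_eq_getElem _ ' ' (by omega)]
            exact List.getElem_mem _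
          rw [this, htim1]
        have hc2 : q + k = cs.length - 1 := by omega
        rw [if_neg hc1, if_pos hc2]
        have ht2 : ¬ pvA_charType ((c0 :: rest0).getD k ' ') = t := by
          intro h
          apply hsame
          rw [show q + j = q + k by omega, typesD _ _ (by omega), ← hgq, h]
          exact (htprev k (by omega)).symm
        rw [if_neg ht2]
        have hl : q + j - (q - 1, rs, gen).1 = k + 1 := by
          simp only []
          omega
        have hbridge : pvA_currentPart ((cs.map pvA_charType).getD (q + j) "") cs
            ((1 : Nat) : Int) (((q + j : Nat) : Int) + 1) =
            pvA_lastCharPart cs ((c0 :: rest0).getD k ' ') ((cs.length : Int) - 1) := by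
          rw [show q + j = q + k by omega, typesD _ _ (by omega), ← hgq,
            show ((q + k : Nat) : Int) = (cs.length : Int) - 1 by omega]
          exact lastPart_bridge cs _ _
        rw [htim1, hl, hbridge]
        simp only [show ((q - 1 : Nat), rs, gen).2.1 = rs from rfl,
          show ((q - 1 : Nat), rs, gen).2.2 = gen from rfl]
        rw [show ((q + j : Nat) : Int) = (cs.length : Int) - 1 by omega]
        by_cases hsp : t = "SPECIAL" <;> simp [hsp, hlast]
    · -- a middle boundary: emit and recurse
      have hjk : j = k := by omega
      rw [pvB_step_mid cs _ _ _ _ hiq (by omega)]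
      have hl : q + j - (q - 1, rs, gen).1 = k + 1 := by
        simp only []
        omega
      rw [htim1, hl]
      have hc1 : ¬ q + k = cs.length := by omega
      have hc2 : ¬ q + k = cs.length - 1 := by omega
      rw [if_neg hc1, if_neg hc2]
      have ht2 : pvA_charType ((c0 :: rest0).getD k ' ') = pvA_charType (cs.getD (q + k) ' ') := by
        rw [hgq]
      have hdrop2 : (c0 :: rest0).drop (k + 1) = cs.drop (q + k + 1) := by
        rw [← hsuf, List.drop_drop]
        try congr 1
        try omega
      have hIH := ih (q + k + 1) (pvA_charType (cs.getD (q + k) ' '))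
        (rs ++ pvA_currentPart t cs ((k + 1 : Nat) : Int) ((q + k : Nat) : Int))
        (if t ≠ "SPECIAL" then
          gen ++ [pvA_genericRegex cs ((q + k : Nat) : Int) ((k + 1 : Nat) : Int)
            (pvA_currentPart t cs ((k + 1 : Nat) : Int) ((q + k : Nat) : Int))]
        else gen)
        (by omega) (by omega) (by omega) rfl
      rw [show q + k + 1 - 1 = q + k from rfl] at hIH
      rw [show cs.length - (q + k + 1) = cs.length - q - k - 1 by omega] at hIH
      simp only [show ((q - 1 : Nat), rs, gen).2.1 = rs from rfl,
        show ((q - 1 : Nat), rs, gen).2.2 = gen from rfl, hjk]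
      rw [hdrop2, ht2, hIH]
      by_cases hsp : t = "SPECIAL" <;> simp [hsp]

theorem single_eq (name : String) (c : Char) (h : name.toList = [c]) :
    get_regex_based_on_name_py name = get_regex_based_on_name_py_alt name := by
  simp only [get_regex_based_on_name_py, get_regex_based_on_name_py_alt]
  rw [h]
  rw [PySem.List.pyGet?_zero_cons]
  simp only [Option.getD_some]
  rw [PySem.List.enumerate_cons, PySem.List.enumerate_nil, List.foldl_cons, List.foldl_nil]
  rw [pvA_step_last_same _ _ _ _ (by simp) rfl]
  have hfil : (List.range ([c] : List Char).length).filter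
      (pvFire (([c] : List Char).map pvA_charType) ([c] : List Char).length) = [0] := by
    simp [pvFire]
  rw [hfil, List.foldl_cons, List.foldl_nil]
  have hstep : pvB_step [c] (([c] : List Char).map pvA_charType) ([c] : List Char).length
      (0, [], []) 0 =
      (0, pvA_currentPart (pvA_charType c) [c] ((1 : Nat) : Int) ((0 : Nat) : Int),
        if pvA_charType c ≠ "SPECIAL" then
          [pvA_genericRegex [c] ((0 : Nat) : Int) ((1 : Nat) : Int)
            (pvA_currentPart (pvA_charType c) [c] ((1 : Nat) : Int) ((0 : Nat) : Int))]
        else []) := by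
    simp only [pvB_step, List.length_cons, List.length_nil, List.map_cons, List.map_nil]
    norm_num
  rw [hstep]
  have e1 : (-1 : Int) + 1 + 1 = ((1 : Nat) : Int) := by norm_num
  have e2 : ((0 : Nat) : Int) = (0 : Int) := by norm_num
  simp only [e1, e2]
  by_cases hsp : pvA_charType c ≠ "SPECIAL" <;> simp [hsp]

theorem main_eq (name : String) (hn2 : 2 ≤ name.toList.length) :
    get_regex_based_on_name_py name = get_regex_based_on_name_py_alt name := by
  have hpre' : name.toList ≠ [] := by
    intro h
    rw [h] at hn2
    simp at hn2
  obtain ⟨c0, rest, hcs⟩ := List.exists_cons_of_ne_nil hpre'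
  have hget0c : name.toList.getD 0 ' ' = c0 := by rw [hcs]; rfl
  have hget0 : (PySem.List.pyGet? name.toList 0).getD ' ' = c0 := by
    rw [hcs, PySem.List.pyGet?_zero_cons]
    rfl
  have ht0 : (name.toList.map pvA_charType).getD 0 "" = pvA_charType c0 := by
    rw [typesD _ _ (by omega), hget0c]
  have hrange : List.range name.toList.length = 0 :: List.range' 1 (name.toList.length - 1) := by
    rw [List.range_eq_range', show name.toList.length = (name.toList.length - 1) + 1 by omega,
      List.range'_succ, show (name.toList.length - 1) + 1 - 1 = name.toList.length - 1 by omega]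
  have hdrop1 : name.toList.drop 1 = rest := by rw [hcs]; rfl
  simp only [get_regex_based_on_name_py, get_regex_based_on_name_py_alt]
  rw [hget0, hrange]
  by_cases hsp : pvA_charType c0 = "SPECIAL"
  · -- A fires at index 0 (its SPECIAL wraparound part), and so does B's boundary list
    have hf0 : pvFire (name.toList.map pvA_charType) name.toList.length 0 = true := by
      unfold pvFire
      rw [ht0, hsp]
      simp
    rw [List.filter_cons_of_pos hf0, List.foldl_cons]
    have hstep0 : pvB_step name.toList (name.toList.map pvA_charType) name.toList.length
        ((0, [], []) : Nat × List Char × List (List Char)) 0 =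
        (0, pvA_currentPart "SPECIAL" name.toList ((0 : Nat) : Int) ((0 : Nat) : Int), []) := by
      rw [pvB_step_zero _ _ _ _ (show ¬ (0 : Nat) = name.toList.length - 1 by omega)]
      rw [ht0, hsp]
      rw [if_neg (by simp)]
      simp
    rw [hstep0]
    have hB := pvB_main name.toList name.toList.length 1 "SPECIAL"
      (pvA_currentPart "SPECIAL" name.toList ((0 : Nat) : Int) ((0 : Nat) : Int)) []
      (by omega) (by omega) (by omega) (by rw [hget0c]; exact hsp.symm)
    rw [show (1 : Nat) - 1 = 0 from rfl] at hB
    rw [hB]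
    have hstep1 : List.foldl (pvA_step name.toList) ⟨-1, pvA_charType c0, [], []⟩
        (PySem.List.enumerate name.toList 0) =
        List.foldl (pvA_step name.toList)
          ⟨0, "SPECIAL", pvA_currentPart "SPECIAL" name.toList ((0 : Nat) : Int) ((0 : Nat) : Int), []⟩
          (PySem.List.enumerate (name.toList.drop 1) ((1 : Nat) : Int)) := by
      conv_lhs => rw [hcs, PySem.List.enumerate_cons, List.foldl_cons]
      rw [pvA_step_boundary _ _ _ _ (Or.inr (Or.inl hsp)) ?hni]
      case hni =>
        have h3 := congrArg List.length hcs
        simp only [List.length_cons] at h3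
        simp only [List.length_cons]
        push_cast
        omega
      rw [hsp]
      rw [if_neg (by simp)]
      simp only [List.nil_append]
      rw [show (-1 : Int) + 1 = ((0 : Nat) : Int) by norm_num,
        show ((0 : Int) + 1) = ((1 : Nat) : Int) by norm_num, hdrop1]
      try rw [hcs]
      try rfl
    obtain ⟨a, u, hfold⟩ := pvA_main name.toList name.toList.length (name.toList.drop 1) 1
      "SPECIAL" (pvA_currentPart "SPECIAL" name.toList ((0 : Nat) : Int) ((0 : Nat) : Int)) []
      rfl (by omega) (by omega) (by simp)
    rw [hdrop1] at hB hfold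
    rw [hstep1, hdrop1, hfold]
  · -- no boundary at index 0: A's first iteration only counts, B's filter drops 0
    have hf0 : pvFire (name.toList.map pvA_charType) name.toList.length 0 = false := by
      have hlen' : name.toList.length = name.length := by simp
      unfold pvFire
      rw [ht0]
      simp [hsp, show ¬(0 : Nat) = name.length - 1 by omega]
    rw [List.filter_cons_of_neg (by rw [hf0]; exact Bool.false_ne_true)]
    have hB := pvB_main name.toList name.toList.length 1 (pvA_charType c0) [] []
      (by omega) (by omega) (by omega) (by rw [hget0c])
    rw [show (1 : Nat) - 1 = 0 from rfl] at hB
    rw [hB]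
    have hstep1 : List.foldl (pvA_step name.toList) ⟨-1, pvA_charType c0, [], []⟩
        (PySem.List.enumerate name.toList 0) =
        List.foldl (pvA_step name.toList) ⟨0, pvA_charType c0, [], []⟩
          (PySem.List.enumerate (name.toList.drop 1) ((1 : Nat) : Int)) := by
      conv_lhs => rw [hcs, PySem.List.enumerate_cons, List.foldl_cons]
      rw [pvA_step_quiet _ _ _ _ rfl hsp ?hni]
      case hni =>
        have h3 := congrArg List.length hcs
        simp only [List.length_cons] at h3
        simp only [List.length_cons]
        push_cast
        omega
      rw [show (-1 : Int) + 1 = 0 by norm_num, show ((0 : Int) + 1) = ((1 : Nat) : Int) by norm_num]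
      try rw [hcs]
      try rfl
    obtain ⟨a, u, hfold⟩ := pvA_main name.toList name.toList.length (name.toList.drop 1) 1
      (pvA_charType c0) [] [] rfl (by omega) (by omega) (by simp)
    rw [hstep1, hfold]

-- ===== VERDICT (by name: the statement is the Claim_ definition above) =====
theorem get_regex_based_on_name_py_spec : Claim_equal_get_regex_based_on_name_py := by
  intro name hdom hpre
  unfold Spec_get_regex_based_on_name_py
  have hpre' : name.toList ≠ [] := hpre
  by_cases hn1 : name.toList.length ≤ 1
  · obtain ⟨c, hc⟩ : ∃ c, name.toList = [c] := by
      cases h : name.toList with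
      | nil => exact absurd h hpre'
      | cons a b =>
        cases hb : b with
        | nil => exact ⟨a, by simp [h, hb]⟩
        | cons x y => exfalso; rw [h, hb] at hn1; simp at hn1
    exact single_eq name c hc
  · exact main_eq name (by omega)
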